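-- pv_equiv track=rewrite | github.com/tomekhotdog/AdventOfCode | 2022/q13.py | find_separator_indices
-- ===== SOURCE A (Python) =====
-- from typing import List
--
-- def find_separator_indices(raw_input: str) -> List[int]:
--     indices = []
--     level = 0
--     for index, elem in enumerate(raw_input):
--         if elem == '[':
--             level += 1
--         elif elem == ']':
--             level -= 1
--         elif elem == ',' and level == 1:
--             indices.append(index)
--     return indices
-- ===== SOURCE B (Python) =====
-- from typing import List
--
-- def find_separator_indices(raw_input: str) -> List[int]:
--     # Stateless: a comma is top-level iff its prefix holds exactly one more '[' than ']'.
--     return [i for i, c in enumerate(raw_input)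
--             if c == ',' and raw_input.count('[', 0, i) - raw_input.count(']', 0, i) == 1]
-- ===== Notes on version B (the rewrite author's own statement) =====
-- stated objective: alternative
-- what changed: Drops the running level counter entirely: for each comma, the bracket depth is recomputed independently as count('[') minus count(']') over the prefix before it, turning the single stateful pass into a stateless per-comma prefix-counting check.
import Mathlib
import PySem

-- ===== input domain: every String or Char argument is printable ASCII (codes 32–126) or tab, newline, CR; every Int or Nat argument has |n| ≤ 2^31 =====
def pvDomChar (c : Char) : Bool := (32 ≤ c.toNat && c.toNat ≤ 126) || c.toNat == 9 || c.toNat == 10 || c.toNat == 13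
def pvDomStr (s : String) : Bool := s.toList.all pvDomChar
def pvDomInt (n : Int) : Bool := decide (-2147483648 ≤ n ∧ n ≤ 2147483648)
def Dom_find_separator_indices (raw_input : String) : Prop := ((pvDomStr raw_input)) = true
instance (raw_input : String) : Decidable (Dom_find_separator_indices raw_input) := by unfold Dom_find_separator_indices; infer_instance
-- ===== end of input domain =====

-- B drops A's running level counter: each comma's depth is recomputed independently by counting '[' and ']' in its prefix (stateless per-comma check; alternative decomposition, not faster).


-- ===== PORT A =====
-- single pass: fold over enumerated chars carrying (indices, level)
def find_separator_indices (raw_input : String) : List Int :=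
  ((PySem.List.enumerate raw_input.toList).foldl
    (fun (st : List Int × Int) p =>
      if p.2 = '[' then (st.1, st.2 + 1)
      else if p.2 = ']' then (st.1, st.2 - 1)
      else if p.2 = ',' ∧ st.2 = 1 then (st.1 ++ [p.1], st.2)
      else st)
    ([], 0)).1

-- ===== PORT B =====
-- stateless per-comma check: depth before index i recomputed as '[' count minus ']' count
-- over the prefix; s.count(c, 0, i) is ported as (toList.take i.toNat).count c (exact: i ≥ 0)
def find_separator_indices_alt (raw_input : String) : List Int :=
  (PySem.List.enumerate raw_input.toList).filterMap
    (fun p => if p.2 = ',' ∧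
        ((raw_input.toList.take p.1.toNat).count '[' : Int)
          - ((raw_input.toList.take p.1.toNat).count ']' : Int) = 1
      then some p.1 else none)

-- ===== PRECONDITION & SPEC =====
def Spec_find_separator_indices (raw_input : String) (out : List Int) : Prop := out = find_separator_indices_alt raw_input
instance (raw_input : String) (out : List Int) : Decidable (Spec_find_separator_indices raw_input out) := by unfold Spec_find_separator_indices; infer_instance

-- ===== CLAIM (what is proved, stated in full; the proofs are below) =====
def Claim_equal_find_separator_indices : Prop := ∀ (raw_input : String), Dom_find_separator_indices raw_input → Spec_find_separator_indices raw_input (find_separator_indices raw_input)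

-- ===== LEMMAS AND PROOFS =====

-- common recursive specification: top-level comma indices of l, positions from k, current level lvl
def pvSpecRec (l : List Char) (k : Int) (lvl : Int) : List Int :=
  match l with
  | [] => []
  | c :: r =>
    if c = '[' then pvSpecRec r (k + 1) (lvl + 1)
    else if c = ']' then pvSpecRec r (k + 1) (lvl - 1)
    else if c = ',' ∧ lvl = 1 then k :: pvSpecRec r (k + 1) lvl
    else pvSpecRec r (k + 1) lvl

def pvBal (l : List Char) : Int := (l.count '[' : Int) - (l.count ']' : Int)

theorem pvBal_append_one (done : List Char) (c : Char) :
    pvBal (done ++ [c]) =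
      if c = '[' then pvBal done + 1 else if c = ']' then pvBal done - 1 else pvBal done := by
  unfold pvBal
  split_ifs with h1 h2
  · subst h1; simp [List.count_append]; ring
  · subst h2; simp [List.count_append]; ring
  · simp [List.count_append, h1, h2]

-- A's fold equals acc ++ pvSpecRec
theorem pvA_fold (l : List Char) (k : Int) (acc : List Int) (lvl : Int) :
    ((PySem.List.enumerate l k).foldl
      (fun (st : List Int × Int) p =>
        if p.2 = '[' then (st.1, st.2 + 1)
        else if p.2 = ']' then (st.1, st.2 - 1)
        else if p.2 = ',' ∧ st.2 = 1 then (st.1 ++ [p.1], st.2)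
        else st)
      (acc, lvl)).1 = acc ++ pvSpecRec l k lvl := by
  induction l generalizing k acc lvl with
  | nil => simp [pvSpecRec, PySem.List.enumerate_nil]
  | cons c r ih =>
    rw [PySem.List.enumerate_cons]
    simp only [List.foldl_cons, pvSpecRec]
    split_ifs with h1 h2 h3 <;> simp_all

-- B's per-comma prefix-count filter equals pvSpecRec (full = done ++ rest, level = pvBal done)
theorem pvB_filter (full : List Char) : ∀ (l done : List Char), full = done ++ l →
    (PySem.List.enumerate l (done.length : Int)).filterMap
      (fun p => if p.2 = ',' ∧
          ((full.take p.1.toNat).count '[' : Int) - ((full.take p.1.toNat).count ']' : Int) = 1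
        then some p.1 else none)
    = pvSpecRec l (done.length : Int) (pvBal done) := by
  intro l
  induction l with
  | nil => intro done h; simp [pvSpecRec, PySem.List.enumerate_nil]
  | cons c r ih =>
    intro done h
    rw [PySem.List.enumerate_cons, List.filterMap_cons]
    have htake : full.take ((done.length : Int)).toNat = done := by
      simp [h]
    have hlen : ((done.length : Int) + 1) = ((done ++ [c]).length : Int) := by simp
    have hfull : full = (done ++ [c]) ++ r := by simp [h]
    have ihr := ih (done ++ [c]) hfull
    rw [hlen, ihr]
    rw [pvBal_append_one]
    by_cases h1 : c = '['
    · simp [h1, pvSpecRec]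
    · by_cases h2 : c = ']'
      · simp [h2, pvSpecRec]
      · by_cases h3 : c = ','
        · simp only [htake]
          by_cases h4 : pvBal done = 1
          · have hc : ((done.count '[' : Int) - (done.count ']' : Int) = 1) := by
              simpa [pvBal] using h4
            simp [h3, h4, pvSpecRec, hc]
          · have hc : ¬((done.count '[' : Int) - (done.count ']' : Int) = 1) := by
              simpa [pvBal] using h4
            simp [h3, h4, pvSpecRec, hc]
        · simp [h1, h2, h3, pvSpecRec]

-- ===== VERDICT (by name: the statement is the Claim_ definition above) =====
theorem find_separator_indices_spec : Claim_equal_find_separator_indices := by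
  intro s _
  unfold Spec_find_separator_indices find_separator_indices find_separator_indices_alt
  rw [pvA_fold]
  have := pvB_filter s.toList s.toList [] (by simp)
  simpa [pvBal] using this.symm
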